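-- pv_equiv track=rewrite | github.com/motanesku/scanner | app/scoring/narrative_score.py | calculate_narrative_score
-- ===== SOURCE A (Python) =====
-- THEME_STRENGTH = {
--     "AI Infrastructure Buildout": 92,
--     "Semiconductors Cycle": 82,
--     "Energy & Commodities": 76,
--     "Cybersecurity": 80,
--     "General Market": 55,
--     "AI Infrastructure": 90,
--     "Semiconductors": 82,
--     "Cloud": 78,
--     "Energy": 72,
--     "Defense": 74,
--     "Biotech": 68,
--     "Copper": 76,
--     "General": 55
-- }
--
-- def calculate_narrative_score(ticker, parsed_news):
--     """
--     Scor de narativă: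
--     - cât de puternică e tema în piață
--     - cât de consistent apare tickerul în acea temă
--     """
--
--     ticker_news = parsed_news.get(ticker, [])
--     if not ticker_news:
--         return 40
--
--     score = 50
--     seen_themes = []
--
--     for item in ticker_news:
--         theme = item.get("theme", "General")
--         sentiment = item.get("sentiment", "neutral")
--
--         if theme not in seen_themes:
--             seen_themes.append(theme)
--             score += int(THEME_STRENGTH.get(theme, 55) * 0.2)
--
--         if sentiment == "bullish":
--             score += 5
--         elif sentiment == "bearish":
--             score -= 5
--
--     if len(ticker_news) >= 3:
--         score += 8
--     elif len(ticker_news) == 2: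
--         score += 4
--     elif len(ticker_news) == 1:
--         score += 2
--
--     return max(0, min(100, score))
-- ===== SOURCE B (Python) =====
-- THEME_STRENGTH = {
--     "AI Infrastructure Buildout": 92,
--     "Semiconductors Cycle": 82,
--     "Energy & Commodities": 76,
--     "Cybersecurity": 80,
--     "General Market": 55,
--     "AI Infrastructure": 90,
--     "Semiconductors": 82,
--     "Cloud": 78,
--     "Energy": 72,
--     "Defense": 74,
--     "Biotech": 68,
--     "Copper": 76,
--     "General": 55
-- }
--
--
-- def calculate_narrative_score(ticker, parsed_news):
--     ticker_news = parsed_news.get(ticker, [])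
--     if not ticker_news:
--         return 40
--
--     # pass 1: distinct themes, each counted once (addition commutes)
--     distinct_themes = {item.get("theme", "General") for item in ticker_news}
--     theme_pts = sum(int(THEME_STRENGTH.get(t, 55) * 0.2) for t in distinct_themes)
--
--     # pass 2/3: sentiment tallies
--     bullish = sum(1 for item in ticker_news if item.get("sentiment", "neutral") == "bullish")
--     bearish = sum(1 for item in ticker_news if item.get("sentiment", "neutral") == "bearish")
--
--     n = len(ticker_news)
--     length_bonus = 8 if n >= 3 else (4 if n == 2 else 2)
--
--     return max(0, min(100, 50 + theme_pts + 5 * bullish - 5 * bearish + length_bonus))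
-- ===== Notes on version B (the rewrite author's own statement) =====
-- stated objective: simpler
-- what changed: Replaces the single interleaved loop with a mutable seen_themes/score accumulator by three independent aggregation passes: a set comprehension of distinct themes summed once, two sentiment counts, then a closed-form length bonus and clamp.
import Mathlib
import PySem

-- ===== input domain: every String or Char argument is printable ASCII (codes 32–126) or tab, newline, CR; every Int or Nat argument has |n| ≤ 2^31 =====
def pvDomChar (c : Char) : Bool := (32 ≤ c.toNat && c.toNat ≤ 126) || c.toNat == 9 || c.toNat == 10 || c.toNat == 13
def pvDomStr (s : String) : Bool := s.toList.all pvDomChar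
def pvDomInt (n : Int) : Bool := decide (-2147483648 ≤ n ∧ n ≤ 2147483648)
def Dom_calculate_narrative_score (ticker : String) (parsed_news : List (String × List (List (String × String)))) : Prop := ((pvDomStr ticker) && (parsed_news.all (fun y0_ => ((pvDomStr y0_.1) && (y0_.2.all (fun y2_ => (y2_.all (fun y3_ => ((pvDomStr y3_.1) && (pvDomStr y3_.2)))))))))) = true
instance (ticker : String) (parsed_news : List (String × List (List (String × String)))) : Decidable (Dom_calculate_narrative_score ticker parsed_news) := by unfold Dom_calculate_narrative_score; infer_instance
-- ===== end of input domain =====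

-- B replaces A's interleaved seen-themes accumulator loop by three independent passes
-- (distinct-theme set summed once, two sentiment counts, closed-form length bonus); objective: simpler.

-- ===== PORT A =====
-- module-level constant shared by both ports
def THEME_STRENGTH : PySem.Dict String Int :=
  PySem.Dict.mk [("AI Infrastructure Buildout", 92), ("Semiconductors Cycle", 82), ("Energy & Commodities", 76),
   ("Cybersecurity", 80), ("General Market", 55), ("AI Infrastructure", 90), ("Semiconductors", 82),
   ("Cloud", 78), ("Energy", 72), ("Defense", 74), ("Biotech", 68), ("Copper", 76), ("General", 55)]

-- int(v * 0.2) for v any value of THEME_STRENGTH or the default 55: exact as floor(v*2/10)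
-- (checked for each of the finitely many values that occur).
def themeBonus (t : String) : Int := PySem.Int.floordiv ((PySem.Dict.getD THEME_STRENGTH t 55) * 2) 10

def themeOf (item : List (String × String)) : String := PySem.Dict.getD (PySem.Dict.mk item) "theme" "General"
def sentOf (item : List (String × String)) : String := PySem.Dict.getD (PySem.Dict.mk item) "sentiment" "neutral"

-- A's for-loop, state = (score, seen_themes)
def loopA : List (List (String × String)) → Int → List String → Int
  | [], score, _seen => score
  | item :: rest, score, seen =>
    let theme := themeOf item
    let sentiment := sentOf item
    let st := if seen.contains theme then (score, seen) else (score + themeBonus theme, seen ++ [theme])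
    let score2 := if sentiment == "bullish" then st.1 + 5
                  else if sentiment == "bearish" then st.1 - 5 else st.1
    loopA rest score2 st.2

def calculate_narrative_score (ticker : String) (parsed_news : List (String × List (List (String × String)))) : Int :=
  let ticker_news := PySem.Dict.getD (PySem.Dict.mk parsed_news) ticker []
  if ticker_news = [] then 40
  else
    let score := loopA ticker_news 50 []
    let score := if ticker_news.length ≥ 3 then score + 8
                 else if ticker_news.length = 2 then score + 4
                 else if ticker_news.length = 1 then score + 2 else score
    max 0 (min 100 score)

-- ===== PORT B =====
def calculate_narrative_score_alt (ticker : String) (parsed_news : List (String × List (List (String × String)))) : Int :=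
  let ticker_news := PySem.Dict.getD (PySem.Dict.mk parsed_news) ticker []
  if ticker_news = [] then 40
  else
    -- pass 1: distinct themes (a set), each bonus counted once; sum is order-independent
    let distinct := PySem.Set.ofList (ticker_news.map themeOf)
    let theme_pts := (distinct.map themeBonus).sum
    -- passes 2/3: sentiment tallies
    let bullish : Int := ticker_news.countP (fun item => sentOf item == "bullish")
    let bearish : Int := ticker_news.countP (fun item => sentOf item == "bearish")
    let length_bonus : Int := if ticker_news.length ≥ 3 then 8
                              else if ticker_news.length = 2 then 4 else 2
    max 0 (min 100 (50 + theme_pts + 5 * bullish - 5 * bearish + length_bonus))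

-- ===== PRECONDITION & SPEC =====
def Spec_calculate_narrative_score (ticker : String) (parsed_news : List (String × List (List (String × String)))) (out : Int) : Prop := out = calculate_narrative_score_alt ticker parsed_news
instance (ticker : String) (parsed_news : List (String × List (List (String × String)))) (out : Int) : Decidable (Spec_calculate_narrative_score ticker parsed_news out) := by unfold Spec_calculate_narrative_score; infer_instance

-- ===== CLAIM (what is proved, stated in full; the proofs are below) =====
def Claim_equal_calculate_narrative_score : Prop := ∀ (ticker : String) (parsed_news : List (String × List (List (String × String)))), Dom_calculate_narrative_score ticker parsed_news → Spec_calculate_narrative_score ticker parsed_news (calculate_narrative_score ticker parsed_news)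

-- ===== LEMMAS AND PROOFS =====

-- loop invariant: A's loop adds the bonuses of the themes newly added to `seen`
-- plus the sentiment adjustments.
theorem loopA_eq (items : List (List (String × String))) : ∀ (s : Int) (seen : List String),
    loopA items s seen
      = s + (((PySem.Set.update seen (items.map themeOf)).map themeBonus).sum
              - ((seen.map themeBonus).sum))
          + 5 * (items.countP (fun item => sentOf item == "bullish") : Int)
          - 5 * (items.countP (fun item => sentOf item == "bearish") : Int) := by
  induction items with
  | nil => intro s seen; simp [loopA, PySem.Set.update]
  | cons item rest ih =>
    intro s seen
    simp only [loopA, List.map_cons, List.countP_cons]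
    by_cases hmem : themeOf item ∈ seen
    · have hadd : PySem.Set.add seen (themeOf item) = seen := by
        simp [PySem.Set.add, hmem]
      by_cases hb : sentOf item == "bullish"
      · have hbe : (sentOf item == "bearish") = false := by
          simp [beq_iff_eq.mp hb]
        simp [hmem, hb, hbe, ih, PySem.Set.update, PySem.Set.add]
        ring
      · by_cases hbe : sentOf item == "bearish" <;>
          simp [hmem, hb, hbe, ih, PySem.Set.update, PySem.Set.add] <;> ring
    · have hadd : PySem.Set.add seen (themeOf item) = seen ++ [themeOf item] := by
        simp [PySem.Set.add, hmem]
      by_cases hb : sentOf item == "bullish"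
      · have hbe : (sentOf item == "bearish") = false := by
          simp [beq_iff_eq.mp hb]
        simp [hmem, hb, hbe, ih, PySem.Set.update, PySem.Set.add]
        ring
      · by_cases hbe : sentOf item == "bearish" <;>
          simp [hmem, hb, hbe, ih, PySem.Set.update, PySem.Set.add] <;> ring

-- ===== VERDICT (by name: the statement is the Claim_ definition above) =====
theorem calculate_narrative_score_spec : Claim_equal_calculate_narrative_score := by
  intro ticker parsed_news _
  unfold Spec_calculate_narrative_score calculate_narrative_score calculate_narrative_score_alt
  set xs := PySem.Dict.getD (PySem.Dict.mk parsed_news) ticker [] with hxs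
  by_cases h : xs = []
  · simp [h]
  · have hloop := loopA_eq xs 50 []
    have hof : PySem.Set.update ([] : List String) (xs.map themeOf) = PySem.Set.ofList (xs.map themeOf) := by
      simp [PySem.Set.update, PySem.Set.ofList_eq_foldl]
    rw [if_neg h, if_neg h, hloop, hof]
    have h1 : 1 ≤ xs.length := Nat.pos_of_ne_zero (by simpa using h)
    simp only [ge_iff_le, List.map_nil, List.sum_nil]
    split_ifs <;> omega
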